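-- pv_equiv track=rewrite | github.com/AndreySamoylenko15/test | main.py | build_longest_puzzle
-- ===== SOURCE A (Python) =====
-- from collections import defaultdict
--
-- def build_graph(fragments):
--     graph = defaultdict(list)
--     for frag in fragments:
--         start = frag[:2]
--         end = frag[-2:]
--         graph[start].append((frag, end))
--     return graph
--
-- def find_longest_chain(graph, start_frag):
--     stack = [(start_frag, start_frag)]
--     longest_chain = []
--
--     while stack:
--         chain, last_frag = stack.pop()
--         last_end = last_frag[-2:]
--
--         if len(chain) > len(longest_chain):
--             longest_chain = chain
--
--         for next_frag, next_start in graph[last_end]: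
--             if next_frag not in chain:
--                 stack.append((chain + next_frag, next_start))
--
--     return longest_chain
--
-- def build_longest_puzzle(fragments):
--     graph = build_graph(fragments)
--     longest_puzzle = ""
--     for frag in fragments:
--         chain = find_longest_chain(graph, frag)
--         if len(chain) > len(longest_puzzle):
--             longest_puzzle = "".join(chain)
--
--     return longest_puzzle
-- ===== SOURCE B (Python) =====
-- from collections import defaultdict
--
-- def build_graph(fragments):
--     graph = defaultdict(list)
--     for frag in fragments:
--         graph[frag[:2]].append((frag, frag[-2:]))
--     return graph
--
-- def build_longest_puzzle(fragments):
--     graph = build_graph(fragments)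
--
--     def dfs(chain, last_frag, best):
--         # pre-order update, strict comparison: first-found longest chain wins
--         if len(chain) > len(best):
--             best = chain
--         # reversed() makes the recursive visit order match LIFO stack order
--         for nxt, nxt_start in reversed(graph[last_frag[-2:]]):
--             if nxt not in chain:
--                 best = dfs(chain + nxt, nxt_start, best)
--         return best
--
--     longest = ""
--     for frag in fragments:
--         chain = dfs(frag, frag, "")
--         if len(chain) > len(longest):
--             longest = chain
--     return longest
-- ===== Notes on version B (the rewrite author's own statement) =====
-- stated objective: alternative
-- what changed: The explicit while-loop with a LIFO stack of pending (chain, fragment) states is replaced by a recursive depth-first search that updates the best chain pre-order and recurses over the children in reversed order, giving the same first-found-longest tie-breaking.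
import Mathlib
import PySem

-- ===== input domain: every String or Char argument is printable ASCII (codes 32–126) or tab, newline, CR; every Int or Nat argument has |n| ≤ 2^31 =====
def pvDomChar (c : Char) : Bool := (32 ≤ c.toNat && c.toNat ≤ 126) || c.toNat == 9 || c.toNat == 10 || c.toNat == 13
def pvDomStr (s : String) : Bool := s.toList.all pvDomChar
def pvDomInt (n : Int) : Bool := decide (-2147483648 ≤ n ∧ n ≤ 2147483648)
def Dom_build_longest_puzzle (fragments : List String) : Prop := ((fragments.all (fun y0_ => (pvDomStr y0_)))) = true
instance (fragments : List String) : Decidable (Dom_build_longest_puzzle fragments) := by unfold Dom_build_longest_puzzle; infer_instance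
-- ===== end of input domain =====

-- B replaces A's explicit LIFO stack by a recursive DFS (children visited in reversed
-- order, best updated pre-order), an alternative decomposition of the same search.

-- ===== PORT A =====
-- shared helper: both Pythons define the identical build_graph (defaultdict append)
def build_graph (fragments : List String) : PySem.Dict String (List (String × String)) :=
  fragments.foldl
    (fun g frag =>
      g.modify (PySem.Str.slice frag none (some 2)) []
        (fun v => v ++ [(frag, PySem.Str.slice frag (some (-2)) none)]))
    PySem.Dict.empty

-- the `while stack:` loop of find_longest_chain, totalized with fuel (one unit per pop);
-- the fuel passed below is proved sufficient, so the port equals Python's loop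
def find_longest_chain_loop (graph : PySem.Dict String (List (String × String))) :
    Nat → List (String × String) → String → String
  | 0, _, longest_chain => longest_chain
  | _ + 1, [], longest_chain => longest_chain
  | fuel + 1, (chain, last_frag) :: rest, longest_chain =>
    let last_end := PySem.Str.slice last_frag (some (-2)) none
    let longest' := if PySem.Str.len chain > PySem.Str.len longest_chain then chain else longest_chain
    let stack' := (graph.getD last_end []).foldl
        (fun st q => if PySem.Str.isIn q.1 chain then st else (chain ++ q.1, q.2) :: st) rest
    find_longest_chain_loop graph fuel stack' longest'

-- Python's longest_chain starts as the list []; it is returned only when no visited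
-- chain beats length 0, and then "".join([]) = "" — so [] is represented by "".
def find_longest_chain (fuel : Nat) (graph : PySem.Dict String (List (String × String)))
    (start_frag : String) : String :=
  find_longest_chain_loop graph fuel [(start_frag, start_frag)] ""

def build_longest_puzzle (fragments : List String) : String :=
  let graph := build_graph fragments
  -- fuel: an over-approximation of the number of loop iterations (proved below), an
  -- artifact of totalizing `while stack:` — it never changes the computed value
  let fuel := (graph.values.flatten.length + 1) ^ (graph.values.flatten.length + 1)
  fragments.foldl
    (fun longest_puzzle frag =>
      let chain := find_longest_chain fuel graph frag
      if PySem.Str.len chain > PySem.Str.len longest_puzzle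
      then PySem.Str.join "" (chain.toList.map (fun c => String.ofList [c]))
      else longest_puzzle)
    ""

-- ===== PORT B =====
-- termination measure for the DFS: how many graph entries are not yet substrings of chain
def pvMu (graph : PySem.Dict String (List (String × String))) (chain : String) : Nat :=
  ((graph.values.flatten).filter (fun q => !PySem.Str.isIn q.1 chain)).length

-- generic: a strictly smaller filter count when Q implies P and some member flips
theorem pvFilterLtAux {a : Type} (P Q : a -> Bool) (himp : forall x, Q x = true -> P x = true) :
    forall l : List a, (l.filter Q).length <= (l.filter P).length := by
  intro l
  induction l with
  | nil => simp
  | cons x t ih =>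
    simp only [List.filter_cons]
    cases hx : Q x with
    | true => simp only [himp x hx, if_true, List.length_cons]; omega
    | false =>
      rw [if_neg (by simp)]
      by_cases hp : P x = true
      · rw [if_pos hp, List.length_cons]; omega
      · rw [if_neg hp]; exact ih

theorem pvFilterLt {a : Type} (P Q : a -> Bool) (himp : forall x, Q x = true -> P x = true)
    (w : a) (hPw : P w = true) (hQw : Q w = false) :
    forall l : List a, w ∈ l -> (l.filter Q).length < (l.filter P).length := by
  intro l hw
  induction l with
  | nil => cases hw
  | cons x t ih =>
    simp only [List.filter_cons]
    rcases List.mem_cons.mp hw with hwx | hwt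
    · subst hwx
      rw [if_pos hPw, if_neg (by simp [hQw]), List.length_cons]
      exact Nat.lt_succ_of_le (pvFilterLtAux P Q himp t)
    · cases hx : Q x with
      | true =>
        simp only [himp x hx, if_true, List.length_cons]
        exact Nat.succ_lt_succ (ih hwt)
      | false =>
        rw [if_neg (by simp)]
        by_cases hp : P x = true
        · rw [if_pos hp, List.length_cons]
          exact Nat.lt_succ_of_lt (ih hwt)
        · rw [if_neg hp]; exact ih hwt

-- a value found under some key is one of the graph's entries
theorem pvMemFlatten (graph : PySem.Dict String (List (String × String))) (k : String)
    (p : String × String) (hp : p ∈ graph.getD k []) : p ∈ graph.values.flatten := by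
  rcases hget : graph.get? k with _ | v
  · rw [PySem.Dict.getD_eq_get?_getD, hget] at hp; simp at hp
  · rw [PySem.Dict.getD_eq_get?_getD, hget] at hp
    have hv : v ∈ graph.values := by
      have hitems := PySem.Dict.mem_items_of_get?_eq_some graph hget
      simp only [PySem.Dict.values]
      exact List.mem_map.mpr ⟨(k, v), hitems, rfl⟩
    exact List.mem_flatten.mpr ⟨v, hv, hp⟩

theorem pvMu_lt (graph : PySem.Dict String (List (String × String))) (chain k : String)
    (p : String × String) (hp : p ∈ graph.getD k []) (hin : PySem.Str.isIn p.1 chain = false) :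
    pvMu graph (chain ++ p.1) < pvMu graph chain := by
  have hflat : p ∈ graph.values.flatten := pvMemFlatten graph k p hp
  -- a substring of chain is a substring of chain ++ p.1
  have hmono : forall q : String × String,
      (!PySem.Str.isIn q.1 (chain ++ p.1)) = true -> (!PySem.Str.isIn q.1 chain) = true := by
    intro q hq
    rw [Bool.not_eq_true'] at hq ⊢
    cases hqc : PySem.Str.isIn q.1 chain with
    | false => rfl
    | true =>
      exfalso
      rw [PySem.Str.isIn_iff_infix] at hqc
      have hbig : PySem.Str.isIn q.1 (chain ++ p.1) = true := by
        rw [PySem.Str.isIn_iff_infix, String.toList_append]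
        exact hqc.trans ((List.prefix_append _ _).isInfix)
      rw [hbig] at hq; cases hq
  have hPw : (!PySem.Str.isIn p.1 chain) = true := by rw [Bool.not_eq_true']; exact hin
  have hQw : (!PySem.Str.isIn p.1 (chain ++ p.1)) = false := by
    rw [Bool.not_eq_false']
    rw [PySem.Str.isIn_iff_infix, String.toList_append]
    exact (List.suffix_append _ _).isInfix
  exact pvFilterLt _ _ hmono p hPw hQw _ hflat

-- the recursive DFS of B: pre-order best update, children in reversed order
def dfs (graph : PySem.Dict String (List (String × String)))
    (chain last_frag best : String) : String :=
  let best' := if PySem.Str.len chain > PySem.Str.len best then chain else best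
  ((graph.getD (PySem.Str.slice last_frag (some (-2)) none) []).reverse).attach.foldl
    (fun b q =>
      if h : PySem.Str.isIn q.1.1 chain then b
      else dfs graph (chain ++ q.1.1) q.1.2 b)
    best'
termination_by pvMu graph chain
decreasing_by
  exact pvMu_lt graph chain _ q.1 (List.mem_reverse.mp q.2) (by simpa using h)

def build_longest_puzzle_alt (fragments : List String) : String :=
  let graph := build_graph fragments
  fragments.foldl
    (fun longest frag =>
      let chain := dfs graph frag frag ""
      if PySem.Str.len chain > PySem.Str.len longest then chain else longest)
    ""

-- ===== PRECONDITION & SPEC =====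
def Spec_build_longest_puzzle (fragments : List String) (out : String) : Prop := out = build_longest_puzzle_alt fragments
instance (fragments : List String) (out : String) : Decidable (Spec_build_longest_puzzle fragments out) := by unfold Spec_build_longest_puzzle; infer_instance

-- ===== CLAIM (what is proved, stated in full; the proofs are below) =====
def Claim_equal_build_longest_puzzle : Prop := ∀ (fragments : List String), Dom_build_longest_puzzle fragments → Spec_build_longest_puzzle fragments (build_longest_puzzle fragments)

-- ===== LEMMAS AND PROOFS =====

-- potential of a stack: bounds the remaining loop iterations
def pvMeas (graph : PySem.Dict String (List (String × String)))
    (stack : List (String × String)) : Nat :=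
  (stack.map (fun q => (graph.values.flatten.length + 1) ^ pvMu graph q.1)).sum

-- the inner for-loop of A pushes exactly the filtered, mapped children, reversed
theorem pvFoldPush (c : String) (children rest : List (String × String)) :
    children.foldl (fun st q => if PySem.Str.isIn q.1 c then st else (c ++ q.1, q.2) :: st) rest
      = (((children.filter (fun q => !PySem.Str.isIn q.1 c)).map
            (fun q => (c ++ q.1, q.2))).reverse) ++ rest := by
  induction children generalizing rest with
  | nil => simp
  | cons x t ih =>
    cases hx : PySem.Str.isIn x.1 c with
    | true =>
      rw [List.foldl_cons, if_pos hx, ih,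
          List.filter_cons_of_neg (a := x) (l := t) (p := fun q => !PySem.Str.isIn q.1 c)
            (by simp only [hx]; simp)]
    | false =>
      rw [List.foldl_cons, if_neg (by simp only [hx]; simp), ih,
          List.filter_cons_of_pos (a := x) (l := t) (p := fun q => !PySem.Str.isIn q.1 c)
            (by simp only [hx]; simp),
          List.map_cons, List.reverse_cons, List.append_assoc, List.cons_append,
          List.nil_append]

-- one unfolding of dfs, rephrased as a fold over A's push list
theorem pvDfsUnfold (graph : PySem.Dict String (List (String × String)))
    (c lf b : String) :
    dfs graph c lf b =
      ((((graph.getD (PySem.Str.slice lf (some (-2)) none) []).filter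
            (fun q => !PySem.Str.isIn q.1 c)).map (fun q => (c ++ q.1, q.2))).reverse).foldl
        (fun b q => dfs graph q.1 q.2 b)
        (if PySem.Str.len c > PySem.Str.len b then c else b) := by
  rw [dfs]
  simp only [dite_eq_ite]
  rw [List.foldl_attach (l := (graph.getD (PySem.Str.slice lf (some (-2)) none) []).reverse)
        (f := fun (b : String) (q : String × String) =>
          if PySem.Str.isIn q.1 c then b else dfs graph (c ++ q.1) q.2 b)]
  rw [← List.map_reverse, ← List.filter_reverse, List.foldl_map, List.foldl_filter]
  congr 1
  funext x y
  cases hq : PySem.Str.isIn y.1 c <;> simp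

-- main lemma: with enough fuel, A's stack loop computes B's DFS fold over the stack
theorem pvLoopEqDfs (graph : PySem.Dict String (List (String × String)))
    (fuel : Nat) (stack : List (String × String)) (longest : String)
    (hfuel : pvMeas graph stack ≤ fuel) :
    find_longest_chain_loop graph fuel stack longest =
      stack.foldl (fun b q => dfs graph q.1 q.2 b) longest := by
  induction fuel generalizing stack longest with
  | zero =>
    cases stack with
    | nil => simp [find_longest_chain_loop]
    | cons q rest =>
      exfalso
      have hpos : 0 < (graph.values.flatten.length + 1) ^ pvMu graph q.1 :=
        Nat.pow_pos (by omega)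
      simp only [pvMeas, List.map_cons, List.sum_cons] at hfuel
      omega
  | succ fuel ih =>
    cases stack with
    | nil => simp [find_longest_chain_loop]
    | cons hd rest =>
      obtain ⟨c, lf⟩ := hd
      have hstep : find_longest_chain_loop graph (fuel + 1) ((c, lf) :: rest) longest =
          find_longest_chain_loop graph fuel
            ((((graph.getD (PySem.Str.slice lf (some (-2)) none) []).filter
                  (fun q => !PySem.Str.isIn q.1 c)).map
                (fun q => (c ++ q.1, q.2))).reverse ++ rest)
            (if PySem.Str.len c > PySem.Str.len longest then c else longest) := by
        simp only [find_longest_chain_loop]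
        rw [pvFoldPush]
      rw [hstep]
      have hfuel' : pvMeas graph
          ((((graph.getD (PySem.Str.slice lf (some (-2)) none) []).filter
                (fun q => !PySem.Str.isIn q.1 c)).map
              (fun q => (c ++ q.1, q.2))).reverse ++ rest) ≤ fuel := by
        simp only [pvMeas, List.map_append, List.sum_append, List.map_reverse,
          List.sum_reverse, List.map_map] at *
        simp only [List.map_cons, List.sum_cons] at hfuel
        rcases hfil : (graph.getD (PySem.Str.slice lf (some (-2)) none) []).filter
            (fun q => !PySem.Str.isIn q.1 c) with _ | ⟨q0, tl⟩
        · rw [hfil]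
          simp only [List.map_nil, List.sum_nil]
          have hB : 0 < (graph.values.flatten.length + 1) ^ pvMu graph c :=
            Nat.pow_pos (by omega)
          omega
        · have hq0 : q0 ∈ (graph.getD (PySem.Str.slice lf (some (-2)) none) []).filter
              (fun q => !PySem.Str.isIn q.1 c) := by rw [hfil]; exact List.mem_cons_self ..
          have hmu_pos : 0 < pvMu graph c := by
            have hin : q0 ∈ (graph.values.flatten).filter (fun q => !PySem.Str.isIn q.1 c) :=
              List.mem_filter.mpr ⟨pvMemFlatten graph _ q0 (List.mem_filter.mp hq0).1,
                (List.mem_filter.mp hq0).2⟩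
            exact List.length_pos_of_mem hin
          have hbound : ∀ x ∈ ((graph.getD (PySem.Str.slice lf (some (-2)) none) []).filter
                (fun q => !PySem.Str.isIn q.1 c)).map
                  ((fun q => (graph.values.flatten.length + 1) ^ pvMu graph q.1) ∘
                    (fun q => (c ++ q.1, q.2))),
              x ≤ (graph.values.flatten.length + 1) ^ (pvMu graph c - 1) := by
            intro x hx
            rcases List.mem_map.mp hx with ⟨q, hq, rfl⟩
            show (graph.values.flatten.length + 1) ^ pvMu graph (c ++ q.1) ≤ _
            have hlt : pvMu graph (c ++ q.1) < pvMu graph c :=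
              pvMu_lt graph c _ q (List.mem_filter.mp hq).1
                (by simpa using (List.mem_filter.mp hq).2)
            exact Nat.pow_le_pow_right (by omega) (by omega)
          have hsum := List.sum_le_card_nsmul _ _ hbound
          simp only [List.length_map, smul_eq_mul] at hsum
          have hlenle : ((graph.getD (PySem.Str.slice lf (some (-2)) none) []).filter
                (fun q => !PySem.Str.isIn q.1 c)).length ≤ graph.values.flatten.length := by
            have h1 := List.length_filter_le (fun q => !PySem.Str.isIn q.1 c)
              (graph.getD (PySem.Str.slice lf (some (-2)) none) [])
            have h2 : (graph.getD (PySem.Str.slice lf (some (-2)) none) []).length ≤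
                graph.values.flatten.length := by
              rcases hget : graph.get? (PySem.Str.slice lf (some (-2)) none) with _ | v
              · rw [PySem.Dict.getD_eq_get?_getD, hget]; simp
              · rw [PySem.Dict.getD_eq_get?_getD, hget]
                have hv : v ∈ graph.values := by
                  have hitems := PySem.Dict.mem_items_of_get?_eq_some graph hget
                  simp only [PySem.Dict.values]
                  exact List.mem_map.mpr ⟨(_, v), hitems, rfl⟩
                have hmem : v.length ∈ graph.values.map List.length := List.mem_map_of_mem hv
                have hle := List.le_sum_of_mem hmem
                rw [List.length_flatten]
                simpa using hle
            omega
          have hS : (((graph.getD (PySem.Str.slice lf (some (-2)) none) []).filter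
                (fun q => !PySem.Str.isIn q.1 c)).map
                  ((fun q => (graph.values.flatten.length + 1) ^ pvMu graph q.1) ∘
                    (fun q => (c ++ q.1, q.2)))).sum ≤
              graph.values.flatten.length *
                ((graph.values.flatten.length + 1) ^ (pvMu graph c - 1)) :=
            le_trans hsum (Nat.mul_le_mul_right _ hlenle)
          have hEA : graph.values.flatten.length *
                ((graph.values.flatten.length + 1) ^ (pvMu graph c - 1)) +
                (graph.values.flatten.length + 1) ^ (pvMu graph c - 1) =
              (graph.values.flatten.length + 1) ^ pvMu graph c := by
            have hA : ((graph.values.flatten.length + 1) ^ (pvMu graph c - 1)) *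
                (graph.values.flatten.length + 1) =
                (graph.values.flatten.length + 1) ^ pvMu graph c := by
              rw [← pow_succ]
              congr 1
              omega
            rw [← hA]
            ring
          have hApos : 0 < (graph.values.flatten.length + 1) ^ (pvMu graph c - 1) :=
            Nat.pow_pos (by omega)
          omega
      rw [ih _ _ hfuel', List.foldl_append, List.foldl_cons]
      congr 1
      exact (pvDfsUnfold graph c lf longest).symm

-- "".join over the characters of a string is that string
theorem pvJoinNoop (s : String) :
    PySem.Str.join "" (s.toList.map (fun c => String.ofList [c])) = s := by
  apply String.toList_inj.mp
  rw [PySem.Str.toList_join, List.map_map]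
  have h1 : (String.toList ∘ fun c => String.ofList [c]) = (fun c : Char => [c]) := by
    funext c; simp
  rw [h1]
  have h2 : ("" : String).toList = [] := rfl
  rw [h2]
  exact PySem.Chars.join_nil_singletons s.toList

-- ===== VERDICT (by name: the statement is the Claim_ definition above) =====
theorem build_longest_puzzle_spec : Claim_equal_build_longest_puzzle := by
  intro fragments _
  unfold Spec_build_longest_puzzle
  show build_longest_puzzle fragments = build_longest_puzzle_alt fragments
  unfold build_longest_puzzle build_longest_puzzle_alt
  have hstep : (fun (longest_puzzle : String) (frag : String) =>
      let chain := find_longest_chain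
        (((build_graph fragments).values.flatten.length + 1) ^
          ((build_graph fragments).values.flatten.length + 1)) (build_graph fragments) frag
      if PySem.Str.len chain > PySem.Str.len longest_puzzle
      then PySem.Str.join "" (chain.toList.map (fun c => String.ofList [c]))
      else longest_puzzle) =
      (fun (longest : String) (frag : String) =>
        let chain := dfs (build_graph fragments) frag frag ""
        if PySem.Str.len chain > PySem.Str.len longest then chain else longest) := by
    funext longest frag
    have hchain : find_longest_chain
        (((build_graph fragments).values.flatten.length + 1) ^
          ((build_graph fragments).values.flatten.length + 1)) (build_graph fragments) frag =
        dfs (build_graph fragments) frag frag "" := by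
      unfold find_longest_chain
      rw [pvLoopEqDfs]
      · simp
      · have hmu : pvMu (build_graph fragments) frag ≤
            (build_graph fragments).values.flatten.length :=
          List.length_filter_le _ _
        simp only [pvMeas, List.map_cons, List.map_nil, List.sum_cons, List.sum_nil,
          Nat.add_zero]
        exact Nat.pow_le_pow_right (by omega) (by omega)
    simp only [hchain, pvJoinNoop]
  simp only [hstep]
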